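-- pv_equiv track=rewrite | github.com/hillelweintraub/ChessDB | Scripts/fill_tables.py | getPriorPositions
-- ===== SOURCE A (Python) =====
-- START_FEN = "rnbqkbnr/pppppppp/8/8/8/8/PPPPPPPP/RNBQKBNR w KQkq - 0 1"
--
-- START_FEN_PROCESSED = "rnbqkbnr/pppppppp/8/8/8/8/PPPPPPPP/RNBQKBNR w KQkq"
--
-- def getPriorPositions(fen):
--     prior_position_list = [START_FEN_PROCESSED] #include start position
--     for line in fen:
--         if line.strip() == START_FEN:
--             if len(prior_position_list) > 1: break  #reached beginning of next game
--             else: continue                          #first game in file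
--         else:
--             line = util_processFENLine(line)
--             prior_position_list.append(line)
--     return prior_position_list
--
-- def util_processFENLine(line):
--     return ' '.join(line.split()[:-3])
-- ===== SOURCE B (Python) =====
-- START_FEN = "rnbqkbnr/pppppppp/8/8/8/8/PPPPPPPP/RNBQKBNR w KQkq - 0 1"
--
-- START_FEN_PROCESSED = "rnbqkbnr/pppppppp/8/8/8/8/PPPPPPPP/RNBQKBNR w KQkq"
--
-- def getPriorPositions(fen):
--     # Split the whole file into segments separated by START_FEN delimiter lines
--     # (like str.split on a separator), then the first game is the first
--     # non-empty segment; process its lines.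
--     segments = []
--     cur = []
--     for line in fen:
--         if line.strip() == START_FEN:
--             segments.append(cur)
--             cur = []
--         else:
--             cur.append(line)
--     segments.append(cur)
--     first_game = next((seg for seg in segments if seg), [])
--     return [START_FEN_PROCESSED] + [' '.join(l.split()[:-3]) for l in first_game]
-- ===== Notes on version B (the rewrite author's own statement) =====
-- stated objective: alternative
-- what changed: Replaces A's stateful break/continue loop (which uses the accumulator's length to decide whether a delimiter starts or ends the game) by a generic split-on-separator pass producing all game segments, followed by selecting the first non-empty segment and mapping the FEN processing over it.
import Mathlib
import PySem

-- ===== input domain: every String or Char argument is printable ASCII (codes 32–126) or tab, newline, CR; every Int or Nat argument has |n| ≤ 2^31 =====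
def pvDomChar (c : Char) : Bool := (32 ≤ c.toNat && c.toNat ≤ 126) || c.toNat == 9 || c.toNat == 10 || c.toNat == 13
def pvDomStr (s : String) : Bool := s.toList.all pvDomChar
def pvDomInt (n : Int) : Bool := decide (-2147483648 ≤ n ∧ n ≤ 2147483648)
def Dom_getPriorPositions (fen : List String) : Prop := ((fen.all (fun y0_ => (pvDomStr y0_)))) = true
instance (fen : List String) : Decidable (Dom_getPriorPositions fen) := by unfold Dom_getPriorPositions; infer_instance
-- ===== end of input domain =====

-- B replaces A's stateful break/continue loop by splitting the file into delimiter-separated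
-- segments and processing the first non-empty one (objective: alternative decomposition).

def pvSTART_FEN : String := "rnbqkbnr/pppppppp/8/8/8/8/PPPPPPPP/RNBQKBNR w KQkq - 0 1"
def pvSTART_FEN_PROCESSED : String := "rnbqkbnr/pppppppp/8/8/8/8/PPPPPPPP/RNBQKBNR w KQkq"

-- util_processFENLine: ' '.join(line.split()[:-3])
def pvProcessFEN (line : String) : String :=
  PySem.Str.join " " (PySem.List.slice (PySem.Str.split₀ line) none (some (-3)))

-- ===== PORT A =====
-- A's for-loop with its accumulator; break returns acc, continue recurses on the rest.
def pvGoA (acc : List String) : List String → List String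
  | [] => acc
  | l :: rest =>
    if PySem.Str.strip l = pvSTART_FEN then
      if acc.length > 1 then acc else pvGoA acc rest
    else pvGoA (acc ++ [pvProcessFEN l]) rest

def getPriorPositions (fen : List String) : List String :=
  pvGoA [pvSTART_FEN_PROCESSED] fen

-- ===== PORT B =====
-- Source B's segmentation loop: split into delimiter-separated segments ('cur' is the open segment).
def pvSegs (cur : List String) : List String → List (List String)
  | [] => [cur]
  | l :: rest =>
    if PySem.Str.strip l = pvSTART_FEN then cur :: pvSegs [] rest
    else pvSegs (cur ++ [l]) rest

-- Source B's next((seg for seg in segments if seg), [])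
def pvFirstNonempty : List (List String) → List String
  | [] => []
  | s :: rest => if s ≠ [] then s else pvFirstNonempty rest

def getPriorPositions_alt (fen : List String) : List String :=
  pvSTART_FEN_PROCESSED :: (pvFirstNonempty (pvSegs [] fen)).map pvProcessFEN

-- ===== PRECONDITION & SPEC =====
def Spec_getPriorPositions (fen : List String) (out : List String) : Prop := out = getPriorPositions_alt fen
instance (fen : List String) (out : List String) : Decidable (Spec_getPriorPositions fen out) := by unfold Spec_getPriorPositions; infer_instance

-- ===== CLAIM (what is proved, stated in full; the proofs are below) =====
def Claim_equal_getPriorPositions : Prop := ∀ (fen : List String), Dom_getPriorPositions fen → Spec_getPriorPositions fen (getPriorPositions fen)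

-- ===== LEMMAS AND PROOFS =====

-- Raw lines of the first game once it has started: up to (not including) the next delimiter.
def pvTakeRaw : List String → List String
  | [] => []
  | l :: rest => if PySem.Str.strip l = pvSTART_FEN then [] else l :: pvTakeRaw rest

-- Once the accumulator holds more than one element, A's loop appends processed lines until a delimiter.
theorem pvGoA_take (rest : List String) : ∀ acc : List String, 1 < acc.length →
    pvGoA acc rest = acc ++ (pvTakeRaw rest).map pvProcessFEN := by
  induction rest with
  | nil => intro acc _; simp [pvGoA, pvTakeRaw]
  | cons l rest ih =>
    intro acc hacc
    by_cases h : PySem.Str.strip l = pvSTART_FEN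
    · simp [pvGoA, pvTakeRaw, h, hacc]
    · have := ih (acc ++ [pvProcessFEN l]) (by simp; omega)
      simp [pvGoA, pvTakeRaw, h, this]

-- With a non-empty open segment, the first non-empty segment is it extended to the next delimiter.
theorem pvSegs_started (rest : List String) : ∀ cur : List String, cur ≠ [] →
    pvFirstNonempty (pvSegs cur rest) = cur ++ pvTakeRaw rest := by
  induction rest with
  | nil => intro cur hc; simp [pvSegs, pvFirstNonempty, pvTakeRaw, hc]
  | cons l rest ih =>
    intro cur hc
    by_cases h : PySem.Str.strip l = pvSTART_FEN
    · simp [pvSegs, pvFirstNonempty, pvTakeRaw, h, hc]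
    · have := ih (cur ++ [l]) (by simp)
      simp [pvSegs, pvTakeRaw, h, this]

-- A's loop from the singleton seed equals B's split-then-select pipeline.
theorem pvMain (fen : List String) :
    pvGoA [pvSTART_FEN_PROCESSED] fen
      = pvSTART_FEN_PROCESSED :: (pvFirstNonempty (pvSegs [] fen)).map pvProcessFEN := by
  induction fen with
  | nil => simp [pvGoA, pvSegs, pvFirstNonempty]
  | cons l rest ih =>
    by_cases h : PySem.Str.strip l = pvSTART_FEN
    · simpa [pvGoA, pvSegs, pvFirstNonempty, h] using ih
    · have hA := pvGoA_take rest ([pvSTART_FEN_PROCESSED] ++ [pvProcessFEN l]) (by simp)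
      have hB := pvSegs_started rest [l] (by simp)
      simp only [List.cons_append, List.nil_append] at hA hB
      simp [pvGoA, pvSegs, h, hA, hB]

-- ===== VERDICT (by name: the statement is the Claim_ definition above) =====
theorem getPriorPositions_spec : Claim_equal_getPriorPositions := by
  intro fen _
  show getPriorPositions fen = getPriorPositions_alt fen
  simpa [getPriorPositions, getPriorPositions_alt] using pvMain fen
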